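-- pv_equiv track=rewrite | github.com/seleznevm/arbScanner | ArbitrageScanner/arbscanner/connectors/real_connector.py | _resolve_symbol
-- ===== SOURCE A (Python) =====
-- def _resolve_symbol(canonical_symbol: str, available_symbols: list[str]) -> str | None:
--     if "-" not in canonical_symbol:
--         return None
--     base, quote = canonical_symbol.split("-", 1)
--     unified = f"{base}/{quote}"
--
--     if unified in available_symbols:
--         return unified
--     prefixed = [symbol for symbol in available_symbols if symbol.startswith(unified + ":")]
--     if prefixed:
--         return prefixed[0]
--
--     # Fallback fuzzy lookup when exchange uses alternate quote suffixes.
--     for symbol in available_symbols: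
--         normalized = symbol.replace("/", "-").split(":")[0]
--         if normalized == canonical_symbol:
--             return symbol
--     return None
-- ===== SOURCE B (Python) =====
-- def _resolve_symbol(canonical_symbol: str, available_symbols: list[str]) -> str | None:
--     if "-" not in canonical_symbol:
--         return None
--     base, quote = canonical_symbol.split("-", 1)
--     unified = f"{base}/{quote}"
--     pref = unified + ":"
--     exact_found = False
--     first_prefixed = None
--     first_fuzzy = None
--     for symbol in available_symbols:
--         if symbol == unified:
--             exact_found = True
--         if first_prefixed is None and symbol.startswith(pref):
--             first_prefixed = symbol
--         if first_fuzzy is None and symbol.replace("/", "-").split(":")[0] == canonical_symbol: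
--             first_fuzzy = symbol
--     if exact_found:
--         return unified
--     if first_prefixed is not None:
--         return first_prefixed
--     return first_fuzzy
-- ===== Notes on version B (the rewrite author's own statement) =====
-- stated objective: alternative
-- what changed: A's three separate traversals (membership test, prefixed-filter, fuzzy for-loop) are replaced by one pass over available_symbols that maintains three candidates (exact flag, first prefixed, first fuzzy) and picks by priority afterwards.
import Mathlib
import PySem

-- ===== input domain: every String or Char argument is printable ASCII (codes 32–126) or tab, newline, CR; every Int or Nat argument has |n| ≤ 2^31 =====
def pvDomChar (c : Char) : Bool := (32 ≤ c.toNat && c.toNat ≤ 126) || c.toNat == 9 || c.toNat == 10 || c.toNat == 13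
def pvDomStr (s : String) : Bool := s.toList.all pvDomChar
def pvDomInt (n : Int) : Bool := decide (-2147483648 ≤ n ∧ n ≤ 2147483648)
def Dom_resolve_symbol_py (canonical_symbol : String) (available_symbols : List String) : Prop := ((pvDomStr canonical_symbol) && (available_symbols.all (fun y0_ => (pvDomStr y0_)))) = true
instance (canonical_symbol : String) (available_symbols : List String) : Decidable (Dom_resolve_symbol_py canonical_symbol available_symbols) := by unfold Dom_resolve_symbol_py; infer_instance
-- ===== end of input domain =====

-- ===== PORT A =====
-- B changes only the decomposition: one pass keeping three candidates instead of A's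
-- three traversals; the return value is identical on all inputs ("alternative").
-- fuzzy fallback loop of A: first symbol whose normalized form equals canonical_symbol
def pvFuzzyA (canonical_symbol : String) : List String → Option String
  | [] => none
  | symbol :: rest =>
    if ((PySem.Str.split? (PySem.Str.replace symbol "/" "-") ":").getD []).headD "" == canonical_symbol
    then some symbol
    else pvFuzzyA canonical_symbol rest

-- exact port of A; split("-",1) always yields two pieces here since "-" ∈ canonical_symbol,
-- and split(":") is never empty, so the getD/headD defaults are never taken
def resolve_symbol_py (canonical_symbol : String) (available_symbols : List String) : Option String :=
  if PySem.Str.isIn "-" canonical_symbol = false then none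
  else
    let parts := (PySem.Str.splitMax? canonical_symbol "-" 1).getD []
    let base := parts.headD ""
    let quote := (parts.drop 1).headD ""
    let unified := PySem.Str.join "" [base, "/", quote]
    if available_symbols.contains unified then some unified
    else
      match available_symbols.filter
          (fun symbol => PySem.Str.startswith symbol (PySem.Str.join "" [unified, ":"])) with
      | p :: _ => some p
      | [] => pvFuzzyA canonical_symbol available_symbols

-- ===== PORT B =====
-- loop body of B: update (exact_found, first_prefixed, first_fuzzy) with one symbol
def pvStepB (canonical_symbol unified pref : String)
    (st : Bool × Option String × Option String) (symbol : String) :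
    Bool × Option String × Option String :=
  let st1 := if symbol == unified then (true, st.2.1, st.2.2) else st
  let st2 := if st1.2.1.isNone && PySem.Str.startswith symbol pref
             then (st1.1, some symbol, st1.2.2) else st1
  if st2.2.2.isNone &&
      (((PySem.Str.split? (PySem.Str.replace symbol "/" "-") ":").getD []).headD "" == canonical_symbol)
  then (st2.1, st2.2.1, some symbol) else st2

def resolve_symbol_py_alt (canonical_symbol : String) (available_symbols : List String) : Option String :=
  if PySem.Str.isIn "-" canonical_symbol = false then none
  else
    let parts := (PySem.Str.splitMax? canonical_symbol "-" 1).getD []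
    let unified := PySem.Str.join "" [parts.headD "", "/", (parts.drop 1).headD ""]
    let pref := PySem.Str.join "" [unified, ":"]
    let st := available_symbols.foldl (pvStepB canonical_symbol unified pref) (false, none, none)
    if st.1 then some unified
    else match st.2.1 with
      | some p => some p
      | none => st.2.2

-- ===== PRECONDITION & SPEC =====
def Spec_resolve_symbol_py (canonical_symbol : String) (available_symbols : List String) (out : Option String) : Prop := out = resolve_symbol_py_alt canonical_symbol available_symbols
instance (canonical_symbol : String) (available_symbols : List String) (out : Option String) : Decidable (Spec_resolve_symbol_py canonical_symbol available_symbols out) := by unfold Spec_resolve_symbol_py; infer_instance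

-- ===== CLAIM (what is proved, stated in full; the proofs are below) =====
def Claim_equal_resolve_symbol_py : Prop := ∀ (canonical_symbol : String) (available_symbols : List String), Dom_resolve_symbol_py canonical_symbol available_symbols → Spec_resolve_symbol_py canonical_symbol available_symbols (resolve_symbol_py canonical_symbol available_symbols)

-- ===== LEMMAS AND PROOFS =====
-- characterisation of B's fold: each component is its own first-hit/any-hit computation
theorem pvFold_char (canonical unified pref : String) (xs : List String)
    (e : Bool) (p f : Option String) :
    xs.foldl (pvStepB canonical unified pref) (e, p, f) =
      (e || xs.contains unified,
       p.or (xs.find? (fun s => PySem.Str.startswith s pref)),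
       f.or (pvFuzzyA canonical xs)) := by
  induction xs generalizing e p f with
  | nil => simp [pvFuzzyA]
  | cons s rest ih =>
    simp only [List.foldl_cons, ih]
    cases p <;> cases f <;>
      by_cases h1 : (s == unified) = true <;>
      by_cases h2 : PySem.Str.startswith s pref = true <;>
      by_cases h3 : (((PySem.Str.split? (PySem.Str.replace s "/" "-") ":").getD []).headD "" == canonical) = true <;>
      simp_all [pvStepB, pvFuzzyA] <;>
      simp [decide_eq_false fun h : _ = _ => h1 h.symm]

-- ===== VERDICT (by name: the statement is the Claim_ definition above) =====
theorem resolve_symbol_py_spec : Claim_equal_resolve_symbol_py := by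
  intro canonical_symbol available_symbols _
  unfold Spec_resolve_symbol_py resolve_symbol_py resolve_symbol_py_alt
  by_cases hin : PySem.Str.isIn "-" canonical_symbol = false
  · rw [if_pos hin, if_pos hin]
  · rw [if_neg hin, if_neg hin]
    dsimp only
    rw [pvFold_char]
    by_cases hc : available_symbols.contains
        (PySem.Str.join "" [((PySem.Str.splitMax? canonical_symbol "-" 1).getD []).headD "", "/",
          (((PySem.Str.splitMax? canonical_symbol "-" 1).getD []).drop 1).headD ""]) = true
    · simp only [hc, Bool.false_or, ite_true]
    · simp only [hc, Bool.false_or, Option.none_or]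
      rw [← List.head?_filter]
      cases hfl : available_symbols.filter (fun s => PySem.Str.startswith s
          (PySem.Str.join "" [PySem.Str.join "" [((PySem.Str.splitMax? canonical_symbol "-" 1).getD []).headD "", "/",
            (((PySem.Str.splitMax? canonical_symbol "-" 1).getD []).drop 1).headD ""], ":"])) with
      | nil => simp
      | cons a l => simp
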